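-- pv_equiv track=rewrite | github.com/MITeaps/pyinsar | pyinsar/processing/utilities/generic.py | select_max_matched_data
-- ===== SOURCE A (Python) =====
-- from collections import OrderedDict
--
-- def _get_key(data):
--     """
--     Retrieve the key for a particular image
--
--     @param data: Dictionary of information from the Alaska Satellite Facility
--     @return Dictionary key for data
--     """
--     return data['track'], data['frameNumber']
--
-- def select_max_matched_data(sentinel_data_list):
--     """
--     Select the data that can be combined into an interferogram
--
--     The particular frame and track that maximizes the number
--     of useable data is chosen
--
--     @param sentinel_data_list:
--     @returns:
--     """
--
--     def add_to_key(key):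
--         """
--         Count the number of overlapping images
--
--         @param key: Key to use to identify image location
--         """
--
--         if key not in max_keys:
--             max_keys[key] = 1
--         else:
--             max_keys[key] += 1
--
--     max_keys = OrderedDict()
--     for data in sentinel_data_list:
--         add_to_key(_get_key(data))
--
--     max_orbit = None
--     max_count = -1
--     for orbit, count in max_keys.items():
--         if max_count < count:
--             max_count = count
--             max_orbit = orbit
--
--     final_data_list = []
--     for data in sentinel_data_list:
--         if _get_key(data) == max_orbit:
--             final_data_list.append(data)
--
--     return final_data_list
-- ===== SOURCE B (Python) =====
-- def select_max_matched_data(sentinel_data_list):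
--     # Group the data items by (track, frameNumber) in one pass, then return
--     # the first-inserted largest group (strict < keeps the earliest key on ties).
--     groups = {}
--     for data in sentinel_data_list:
--         groups.setdefault((data['track'], data['frameNumber']), []).append(data)
--     best = []
--     for group in groups.values():
--         if len(best) < len(group):
--             best = group
--     return best
-- ===== Notes on version B (the rewrite author's own statement) =====
-- stated objective: simpler
-- what changed: B builds one dict grouping items by (track, frameNumber) and returns the first largest group directly, removing A's separate count dict, argmax-over-counts pass and final re-filtering pass over the input.
import Mathlib
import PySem

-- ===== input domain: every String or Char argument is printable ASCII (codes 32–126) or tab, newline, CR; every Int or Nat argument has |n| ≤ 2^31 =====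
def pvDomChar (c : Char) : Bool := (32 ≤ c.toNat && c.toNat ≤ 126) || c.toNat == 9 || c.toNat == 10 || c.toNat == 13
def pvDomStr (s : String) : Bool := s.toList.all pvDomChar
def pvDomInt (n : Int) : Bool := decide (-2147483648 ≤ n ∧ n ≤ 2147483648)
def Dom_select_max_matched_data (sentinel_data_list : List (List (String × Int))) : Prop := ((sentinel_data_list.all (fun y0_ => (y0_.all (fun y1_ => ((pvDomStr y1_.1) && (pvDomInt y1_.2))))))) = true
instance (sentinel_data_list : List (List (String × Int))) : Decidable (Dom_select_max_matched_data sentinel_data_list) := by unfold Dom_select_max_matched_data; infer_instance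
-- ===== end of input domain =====

-- B replaces A's three passes (count dict, argmax over counts, re-filter the input) by one
-- grouping dict and a single largest-group scan; objective: simpler, same O(n) cost.

-- ===== PORT A =====
-- _get_key(data) = (data['track'], data['frameNumber']); under Pre_ both lookups succeed,
-- so the Option-valued pair is exact (KeyError inputs are excluded by Pre_).
def pvKeySMM (data : List (String × Int)) : Option Int × Option Int :=
  ((PySem.Dict.mk data).get? "track", (PySem.Dict.mk data).get? "frameNumber")

def select_max_matched_data (sentinel_data_list : List (List (String × Int))) : List (List (String × Int)) :=
  -- max_keys = OrderedDict(); for data: add_to_key(_get_key(data))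
  let max_keys : PySem.Dict (Option Int × Option Int) Int :=
    sentinel_data_list.foldl (fun mk data =>
      let key := pvKeySMM data
      if mk.contains key = false then mk.insert key 1 else mk.modify key 0 (· + 1))
      PySem.Dict.empty
  -- max_orbit = None; max_count = -1; for orbit, count in max_keys.items(): …
  let st : Option (Option Int × Option Int) × Int :=
    max_keys.items.foldl (fun st kv => if st.2 < kv.2 then (some kv.1, kv.2) else st) (none, -1)
  -- final_data_list: for data: if _get_key(data) == max_orbit: append
  sentinel_data_list.foldl (fun acc data =>
    if some (pvKeySMM data) == st.1 then acc ++ [data] else acc) []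

-- ===== PORT B =====
def select_max_matched_data_alt (sentinel_data_list : List (List (String × Int))) : List (List (String × Int)) :=
  -- groups.setdefault(key, []).append(data)
  let groups : PySem.Dict (Option Int × Option Int) (List (List (String × Int))) :=
    sentinel_data_list.foldl (fun g data => g.modify (pvKeySMM data) [] (· ++ [data]))
      PySem.Dict.empty
  -- best = []; for group in groups.values(): if len(best) < len(group): best = group
  groups.values.foldl (fun best g => if best.length < g.length then g else best) []

-- ===== PRECONDITION & SPEC =====
-- Pre_ excludes exactly the inputs where A raises KeyError: some item lacks the
-- 'track' or 'frameNumber' key (B raises there too).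
def Pre_select_max_matched_data (sentinel_data_list : List (List (String × Int))) : Prop :=
  (sentinel_data_list.all (fun data =>
    (PySem.Dict.mk data).contains "track" && (PySem.Dict.mk data).contains "frameNumber")) = true
instance (sentinel_data_list : List (List (String × Int))) : Decidable (Pre_select_max_matched_data sentinel_data_list) := by unfold Pre_select_max_matched_data; infer_instance

def pvWitness_select_max_matched_data : (List (List (String × Int))) :=
  [[("track", 1), ("frameNumber", 2)], [("track", 1), ("frameNumber", 2)], [("track", 3), ("frameNumber", 4)]]

def Spec_select_max_matched_data (sentinel_data_list : List (List (String × Int))) (out : List (List (String × Int))) : Prop := out = select_max_matched_data_alt sentinel_data_list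
instance (sentinel_data_list : List (List (String × Int))) (out : List (List (String × Int))) : Decidable (Spec_select_max_matched_data sentinel_data_list out) := by unfold Spec_select_max_matched_data; infer_instance

-- ===== CLAIM (what is proved, stated in full; the proofs are below) =====
def Claim_equal_select_max_matched_data : Prop := ∀ (sentinel_data_list : List (List (String × Int))), Dom_select_max_matched_data sentinel_data_list → Pre_select_max_matched_data sentinel_data_list → Spec_select_max_matched_data sentinel_data_list (select_max_matched_data sentinel_data_list)

-- ===== LEMMAS AND PROOFS =====

-- the group of key k: the input items whose (track, frameNumber) key equals k, in order
def filtSMM (l : List (List (String × Int))) (k : Option Int × Option Int) : List (List (String × Int)) :=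
  l.filter (fun d => pvKeySMM d == k)

-- A's selection step (over a key, after items_counter) and B's selection step (over a key's group)
def stepASMM (l : List (List (String × Int)))
    (st : Option (Option Int × Option Int) × Int) (k : Option Int × Option Int) :
    Option (Option Int × Option Int) × Int :=
  if st.2 < (((l.map pvKeySMM).count k : Nat) : Int)
  then (some k, (((l.map pvKeySMM).count k : Nat) : Int)) else st

def stepBSMM (l : List (List (String × Int)))
    (b : List (List (String × Int))) (k : Option Int × Option Int) :
    List (List (String × Int)) :=
  if b.length < (filtSMM l k).length then filtSMM l k else b

-- A's counting loop builds Counter(map(_get_key, l))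
lemma smm_maxkeys (l : List (List (String × Int))) :
    l.foldl (fun mk data =>
        let key := pvKeySMM data
        if mk.contains key = false then mk.insert key 1 else mk.modify key 0 (· + 1))
      PySem.Dict.empty
    = PySem.Dict.counter (l.map pvKeySMM) := by
  have hstep : (fun (mk : PySem.Dict (Option Int × Option Int) Int) data =>
      let key := pvKeySMM data
      if mk.contains key = false then mk.insert key 1 else mk.modify key 0 (· + 1))
      = fun mk data => mk.modify (pvKeySMM data) 0 (· + 1) := by
    funext mk data
    by_cases h : mk.contains (pvKeySMM data)
    · simp [h]
    · simp only [Bool.not_eq_true] at h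
      simp [h, PySem.Dict.modify, PySem.Dict.getD_of_not_contains _ _ h]
  rw [hstep, PySem.Dict.counter_eq_foldl, List.foldl_map]

-- B's grouping dict: each key's value is its group
lemma smm_groups_getD (l : List (List (String × Int))) (k : Option Int × Option Int) :
    (l.foldl (fun g data => g.modify (pvKeySMM data) [] (· ++ [data])) PySem.Dict.empty).getD k []
    = filtSMM l k := by
  have h : l.foldl (fun g data => g.modify (pvKeySMM data) [] (· ++ [data])) PySem.Dict.empty
      = (l.map (fun d => (pvKeySMM d, d))).foldl
          (fun g p => g.modify p.1 [] (· ++ [p.2])) PySem.Dict.empty := by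
    rw [List.foldl_map]
  rw [h, PySem.Dict.getD_foldl_modify_append, PySem.Dict.getD_empty]
  simp [filtSMM, List.filter_map, Function.comp_def]

-- B's grouping dict: its keys are the distinct keys, in encounter order
lemma smm_groups_keys (l : List (List (String × Int))) :
    (l.foldl (fun g data => g.modify (pvKeySMM data) [] (· ++ [data])) PySem.Dict.empty).keys
    = PySem.Set.ofList (l.map pvKeySMM) := by
  rw [PySem.Dict.keys_foldl_modify_key l pvKeySMM [] (fun _ data => (· ++ [data]))]
  rw [PySem.Dict.keys_empty, PySem.Set.update_nil_left]

lemma smm_groups_nodup (l : List (List (String × Int))) :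
    (l.foldl (fun g data => g.modify (pvKeySMM data) [] (· ++ [data])) PySem.Dict.empty).keys.Nodup :=
  PySem.Dict.nodup_keys_foldl_modify_key l pvKeySMM [] (fun _ data => (· ++ [data]))
    PySem.Dict.empty PySem.Dict.nodup_keys_empty

-- a dict with nodup keys is its keys list paired with getD
lemma dict_items_eq_keys_map {κ ν : Type} [BEq κ] [LawfulBEq κ]
    (d : PySem.Dict κ ν) (d0 : ν) (h : d.keys.Nodup) :
    d.items = d.keys.map (fun k => (k, d.getD k d0)) := by
  have hk : d.keys = d.items.map (fun p => p.1) := by simp only [PySem.Dict.keys]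
  rw [hk, List.map_map]
  have hc : ∀ p ∈ d.items, ((fun k => (k, d.getD k d0)) ∘ fun p => p.1) p = id p := by
    intro p hp
    obtain ⟨a, b⟩ := p
    have h2 := PySem.Dict.getD_of_mem_items d hp h d0
    simp [h2]
  rw [List.map_congr_left hc, List.map_id]

-- the length of a group is its key's count
lemma smm_len (l : List (List (String × Int))) (k : Option Int × Option Int) :
    (filtSMM l k).length = (l.map pvKeySMM).count k := by
  simp [filtSMM, List.count_eq_length_filter, List.filter_map, Function.comp_def]

-- the two selection loops, run over the same key list, stay in lockstep
lemma smm_loop (l : List (List (String × Int))) (ks : List (Option Int × Option Int)) :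
    ∀ (mo : Option (Option Int × Option Int)) (mc : Int) (best : List (List (String × Int))),
    (∀ k ∈ ks, 1 ≤ (filtSMM l k).length) →
    ((mo = none ∧ mc = -1 ∧ best = []) ∨
      (∃ k, mo = some k ∧ best = filtSMM l k ∧ mc = (best.length : Int))) →
    (((ks.foldl (stepASMM l) (mo, mc)).1 = none ∧ ks.foldl (stepBSMM l) best = []) ∨
      (∃ k, (ks.foldl (stepASMM l) (mo, mc)).1 = some k ∧ ks.foldl (stepBSMM l) best = filtSMM l k)) := by
  induction ks with
  | nil =>
    intro mo mc best _ hR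
    rcases hR with ⟨h1, _, h3⟩ | ⟨k, h1, h2, _⟩
    · exact Or.inl ⟨h1, h3⟩
    · exact Or.inr ⟨k, h1, h2⟩
  | cons k ks ih =>
    intro mo mc best hks hR
    have hk1 : 1 ≤ (filtSMM l k).length := hks k (by simp)
    have hks' : ∀ k' ∈ ks, 1 ≤ (filtSMM l k').length := fun k' hk' => hks k' (by simp [hk'])
    simp only [List.foldl_cons]
    rcases hR with ⟨h1, h2, h3⟩ | ⟨k0, h1, h2, h3⟩
    · subst h1; subst h2; subst h3
      have hc1 : stepASMM l (none, -1) k = (some k, (((l.map pvKeySMM).count k : Nat) : Int)) := by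
        simp only [stepASMM]
        rw [if_pos (by omega)]
      have hc2 : stepBSMM l [] k = filtSMM l k := by
        simp only [stepBSMM]
        rw [if_pos (by simpa using hk1)]
      rw [hc1, hc2]
      exact ih (some k) _ _ hks' (Or.inr ⟨k, rfl, rfl, by rw [smm_len]⟩)
    · subst h1; subst h2; subst h3
      by_cases hlt : (filtSMM l k0).length < (filtSMM l k).length
      · have hc1 : stepASMM l (some k0, ((filtSMM l k0).length : Int)) k
            = (some k, (((l.map pvKeySMM).count k : Nat) : Int)) := by
          simp only [stepASMM]
          rw [if_pos (by rw [← smm_len]; exact_mod_cast hlt)]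
        have hc2 : stepBSMM l (filtSMM l k0) k = filtSMM l k := by
          simp only [stepBSMM]
          rw [if_pos hlt]
        rw [hc1, hc2]
        exact ih (some k) _ _ hks' (Or.inr ⟨k, rfl, rfl, by rw [smm_len]⟩)
      · have hc1 : stepASMM l (some k0, ((filtSMM l k0).length : Int)) k
            = (some k0, ((filtSMM l k0).length : Int)) := by
          simp only [stepASMM]
          rw [if_neg (by rw [← smm_len]; exact_mod_cast hlt)]
        have hc2 : stepBSMM l (filtSMM l k0) k = filtSMM l k0 := by
          simp only [stepBSMM]
          rw [if_neg hlt]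
        rw [hc1, hc2]
        exact ih (some k0) _ _ hks' (Or.inr ⟨k0, rfl, rfl, rfl⟩)

-- ===== VERDICT (by name: the statement is the Claim_ definition above) =====
theorem select_max_matched_data_spec : Claim_equal_select_max_matched_data := by
  intro l _ _
  show select_max_matched_data l = select_max_matched_data_alt l
  unfold select_max_matched_data select_max_matched_data_alt
  simp only [smm_maxkeys, PySem.Dict.items_counter, List.foldl_map]
  have hv : (l.foldl (fun g data => g.modify (pvKeySMM data) [] (· ++ [data])) PySem.Dict.empty).values
      = (PySem.Set.ofList (l.map pvKeySMM)).map (filtSMM l) := by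
    simp only [PySem.Dict.values]
    rw [dict_items_eq_keys_map _ [] (smm_groups_nodup l), smm_groups_keys]
    simp [List.map_map, Function.comp_def, smm_groups_getD]
  rw [hv, List.foldl_map]
  set ks := PySem.Set.ofList (l.map pvKeySMM) with hksdef
  have hcnt : ∀ k ∈ ks, 1 ≤ (filtSMM l k).length := by
    intro k hk
    rw [smm_len]
    have : k ∈ l.map pvKeySMM := (PySem.Set.mem_ofList _ _).mp hk
    exact List.one_le_count_iff.mpr this
  have hA : (fun (x : Option (Option Int × Option Int) × Int) (y : Option Int × Option Int) =>
      if x.2 < (((l.map pvKeySMM).count y : Nat) : Int)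
      then (some y, (((l.map pvKeySMM).count y : Nat) : Int)) else x) = stepASMM l := rfl
  have hB : (fun (x : List (List (String × Int))) (y : Option Int × Option Int) =>
      if x.length < (filtSMM l y).length then filtSMM l y else x) = stepBSMM l := rfl
  rw [hA, hB]
  have hst := smm_loop l ks none (-1) [] hcnt (Or.inl ⟨rfl, rfl, rfl⟩)
  rcases hst with ⟨h1, h2⟩ | ⟨k, h1, h2⟩
  · rw [h1, h2]
    have h3 := PySem.List.foldl_append_if (fun d => some (pvKeySMM d) == none) id l []
    simp only [id_eq, List.map_id, List.nil_append] at h3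
    rw [h3]
    simp
  · rw [h1, h2]
    have h3 := PySem.List.foldl_append_if (fun d => some (pvKeySMM d) == some k) id l []
    simp only [id_eq, List.map_id, List.nil_append] at h3
    rw [h3]
    simp [filtSMM]
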